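-- pv_equiv track=rewrite | github.com/benquick123/code-profiling | code/batch-2/vse-naloge-brez-testov/DN7-M-198.py | po_sosedih
-- ===== SOURCE A (Python) =====
-- def vsa_polja(s, v):
--     return ((x, y) for x in range(s) for y in range(v))
--
-- def sosedov(x, y, mine):
--     #return sum(tx for tx,ty in mine if all(tx in range(x-1,x+2), ty in range(y-1,y+2), not ty==y, not tx==x))
--     c=0
--     for tx,ty in mine:
--         if tx in range(x-1,x+2) and ty in range(y-1,y+2):
--             if ty==y and tx==x:
--                 pass
--             else:
--                 c+=1
--     return c
--
-- def po_sosedih(mine, s, v):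
--     dic={}
--     for i in range(9):
--         dic[i]=set()
--     for x,y in vsa_polja(s,v):
--         key=sosedov(x,y,mine)
--         if key not in dic:
--             dic[key]=set()
--         dic[key].add((x,y))
--     return dic
-- ===== SOURCE B (Python) =====
-- def po_sosedih(mine, s, v):
--     # scatter: each mine adds 1 to each of its 8 neighbours, then bucket cells by count
--     neigh = [(tx + dx, ty + dy)
--              for tx, ty in mine
--              for dx in (-1, 0, 1)
--              for dy in (-1, 0, 1)
--              if dx or dy]
--     counts = {}
--     for c in neigh:
--         counts[c] = counts.get(c, 0) + 1
--     dic = {}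
--     for i in range(9):
--         dic[i] = set()
--     for x in range(s):
--         for y in range(v):
--             key = counts.get((x, y), 0)
--             if key not in dic:
--                 dic[key] = set()
--             dic[key].add((x, y))
--     return dic
-- ===== Notes on version B (the rewrite author's own statement) =====
-- stated objective: faster
-- what changed: Instead of scanning the whole mine list once per grid cell (sosedov), B scatters each mine once into a neighbour-count dictionary over its 8 adjacent cells and then buckets cells by a single dictionary lookup.
import Mathlib
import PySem

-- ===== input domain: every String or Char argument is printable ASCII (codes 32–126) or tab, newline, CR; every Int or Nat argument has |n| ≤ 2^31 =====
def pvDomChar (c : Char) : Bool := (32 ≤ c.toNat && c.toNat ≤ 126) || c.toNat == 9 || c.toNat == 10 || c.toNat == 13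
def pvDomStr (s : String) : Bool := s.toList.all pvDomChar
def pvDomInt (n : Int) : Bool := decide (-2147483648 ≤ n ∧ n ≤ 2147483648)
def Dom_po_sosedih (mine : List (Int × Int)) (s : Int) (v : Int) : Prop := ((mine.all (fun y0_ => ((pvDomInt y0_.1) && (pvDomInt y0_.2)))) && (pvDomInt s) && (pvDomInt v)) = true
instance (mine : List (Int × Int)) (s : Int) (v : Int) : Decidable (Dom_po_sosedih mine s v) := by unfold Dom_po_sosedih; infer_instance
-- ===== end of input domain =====

-- B replaces A's per-cell scan over the mine list (sosedov) by a neighbour-count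
-- dictionary scattered once from the mines; objective: faster (asymptotic).

-- ===== PORT A =====
-- helper sosedov(x, y, mine) of A: counts mines in the 8-neighbourhood of (x, y)
def pvSosedov (x y : Int) (mine : List (Int × Int)) : Int :=
  mine.foldl (fun c t =>
    if (PySem.List.pyRange (x - 1) (x + 2) 1).contains t.1 &&
       (PySem.List.pyRange (y - 1) (y + 2) 1).contains t.2 then
      (if t.2 = y ∧ t.1 = x then c else c + 1)
    else c) 0

def po_sosedih (mine : List (Int × Int)) (s : Int) (v : Int) : List (Int × List (Int × Int)) :=
  let dic0 : PySem.Dict Int (PySem.Set (Int × Int)) :=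
    (PySem.List.pyRange 0 9 1).foldl (fun d i => d.insert i PySem.Set.empty) PySem.Dict.empty
  let dic := (PySem.List.pyRange 0 s 1).foldl (fun d x =>
      (PySem.List.pyRange 0 v 1).foldl (fun d y =>
        let key := pvSosedov x y mine
        let d := if d.contains key then d else d.insert key PySem.Set.empty
        d.modify key PySem.Set.empty (fun st => PySem.Set.add st (x, y))) d) dic0
  dic.items

-- ===== PORT B =====
-- the 8 neighbour offsets (dx outer, dy inner, skipping (0,0)), as in Source B
def pvOffsets : List (Int × Int) :=
  [(-1, -1), (-1, 0), (-1, 1), (0, -1), (0, 1), (1, -1), (1, 0), (1, 1)]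

-- Source B's 'neigh' comprehension
def pvNeigh (mine : List (Int × Int)) : List (Int × Int) :=
  mine.flatMap (fun m => pvOffsets.map (fun o => (m.1 + o.1, m.2 + o.2)))

-- Source B's 'counts' dictionary
def pvCounts (mine : List (Int × Int)) : PySem.Dict (Int × Int) Int :=
  (pvNeigh mine).foldl (fun d c => d.insert c (d.getD c 0 + 1)) PySem.Dict.empty

def po_sosedih_alt (mine : List (Int × Int)) (s : Int) (v : Int) : List (Int × List (Int × Int)) :=
  let counts := pvCounts mine
  let dic0 : PySem.Dict Int (PySem.Set (Int × Int)) :=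
    (PySem.List.pyRange 0 9 1).foldl (fun d i => d.insert i PySem.Set.empty) PySem.Dict.empty
  let dic := (PySem.List.pyRange 0 s 1).foldl (fun d x =>
      (PySem.List.pyRange 0 v 1).foldl (fun d y =>
        let key := counts.getD (x, y) 0
        let d := if d.contains key then d else d.insert key PySem.Set.empty
        d.modify key PySem.Set.empty (fun st => PySem.Set.add st (x, y))) d) dic0
  dic.items

-- ===== PRECONDITION & SPEC =====
def Spec_po_sosedih (mine : List (Int × Int)) (s : Int) (v : Int) (out : List (Int × List (Int × Int))) : Prop := out = po_sosedih_alt mine s v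
instance (mine : List (Int × Int)) (s : Int) (v : Int) (out : List (Int × List (Int × Int))) : Decidable (Spec_po_sosedih mine s v out) := by unfold Spec_po_sosedih; infer_instance

-- ===== CLAIM (what is proved, stated in full; the proofs are below) =====
def Claim_equal_po_sosedih : Prop := ∀ (mine : List (Int × Int)) (s : Int) (v : Int), Dom_po_sosedih mine s v → Spec_po_sosedih mine s v (po_sosedih mine s v)

-- ===== LEMMAS AND PROOFS =====

-- one mine's contribution: its 8 shifted offsets contain (x, y) exactly as often
-- as A's sosedov body increments for that mine
set_option maxHeartbeats 2000000 in
theorem pv_block_count (x y tx ty : Int) :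
    ((pvOffsets.map (fun o => (tx + o.1, ty + o.2))).count (x, y) : Int) =
    (if (PySem.List.pyRange (x - 1) (x + 2) 1).contains tx &&
        (PySem.List.pyRange (y - 1) (y + 2) 1).contains ty then
      (if ty = y ∧ tx = x then 0 else 1)
    else 0) := by
  have hx : (PySem.List.pyRange (x - 1) (x + 2) 1).contains tx = decide (x - 1 ≤ tx ∧ tx < x + 2) := by
    simp [PySem.List.mem_pyRange_one]
  have hy : (PySem.List.pyRange (y - 1) (y + 2) 1).contains ty = decide (y - 1 ≤ ty ∧ ty < y + 2) := by
    simp [PySem.List.mem_pyRange_one]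
  rw [hx, hy]
  simp only [pvOffsets, List.map_cons, List.map_nil, List.count_cons, List.count_nil,
    beq_iff_eq, Prod.mk.injEq, Bool.and_eq_true, decide_eq_true_eq]
  push_cast
  split_ifs <;> omega

theorem pv_sosedov_eq_count (x y : Int) (mine : List (Int × Int)) :
    pvSosedov x y mine = ((pvNeigh mine).count (x, y) : Int) := by
  suffices h : ∀ (mine : List (Int × Int)) (c : Int),
      mine.foldl (fun c t =>
        if (PySem.List.pyRange (x - 1) (x + 2) 1).contains t.1 &&
           (PySem.List.pyRange (y - 1) (y + 2) 1).contains t.2 then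
          (if t.2 = y ∧ t.1 = x then c else c + 1)
        else c) c = c + ((pvNeigh mine).count (x, y) : Int) by
    simpa [pvSosedov] using h mine 0
  intro mine
  induction mine with
  | nil => intro c; simp [pvNeigh]
  | cons m rest ih =>
      intro c
      have hblock := pv_block_count x y m.1 m.2
      simp only [List.foldl_cons, ih, pvNeigh, List.flatMap_cons, List.count_append]
      push_cast
      rw [hblock]
      split_ifs <;> omega

theorem pv_counts_eq_sosedov (mine : List (Int × Int)) (x y : Int) :
    (pvCounts mine).getD (x, y) 0 = pvSosedov x y mine := by
  rw [pv_sosedov_eq_count]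
  simp [pvCounts, PySem.Dict.getD_foldl_insert_add_one]

-- ===== VERDICT (by name: the statement is the Claim_ definition above) =====
theorem po_sosedih_spec : Claim_equal_po_sosedih := by
  intro mine s v _
  unfold Spec_po_sosedih po_sosedih po_sosedih_alt
  simp only [pv_counts_eq_sosedov]
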